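-- pv_equiv track=rewrite | github.com/IBN5101/EXPx-AoC2023 | day01/day01p2.py | replace_first_str_digits
-- ===== SOURCE A (Python) =====
-- str_digits = {
--     "one": 1,
--     "two": 2,
--     "three": 3,
--     "four": 4,
--     "five": 5,
--     "six": 6,
--     "seven": 7,
--     "eight": 8,
--     "nine": 9,
-- }
--
-- def replace_first_str_digits(string:str):
--     lowest_index = 1000
--     lowest_str_digit = ""
--     flag = False
--     for str_digit in str_digits.keys():
--         if str_digit in string:
--             current_index = string.find(str_digit)
--             if current_index < lowest_index:
--                 lowest_index = current_index
--                 lowest_str_digit = str_digit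
--             flag = True
--
--     if flag:
--         l_index = lowest_index
--         r_index = lowest_index + len(lowest_str_digit)
--         new_string = string[:l_index] + \
--             str(str_digits[lowest_str_digit]) + \
--             string[l_index:]
--         return new_string
--     else:
--         return string
-- ===== SOURCE B (Python) =====
-- _words = ["one", "two", "three", "four", "five", "six", "seven", "eight", "nine"]
--
--
-- def replace_first_str_digits(string: str):
--     # Single left-to-right positional scan: insert the digit before the
--     # earliest position where any spelled-out digit word starts.
--     for i in range(len(string)):
--         for d, w in enumerate(_words, 1):
--             if string.startswith(w, i):
--                 return string[:i] + str(d) + string[i:]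
--     return string
-- ===== Notes on version B (the rewrite author's own statement) =====
-- stated objective: simpler
-- what changed: Replaces the nine separate substring-containment and find scans with min/argmin bookkeeping by one left-to-right positional scan that inserts the digit at the first position where any digit word starts; Pre_ excludes the strings (some word present, all first occurrences at index >= 1000) on which A raises KeyError via its lowest_index=1000 sentinel.
import Mathlib
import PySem

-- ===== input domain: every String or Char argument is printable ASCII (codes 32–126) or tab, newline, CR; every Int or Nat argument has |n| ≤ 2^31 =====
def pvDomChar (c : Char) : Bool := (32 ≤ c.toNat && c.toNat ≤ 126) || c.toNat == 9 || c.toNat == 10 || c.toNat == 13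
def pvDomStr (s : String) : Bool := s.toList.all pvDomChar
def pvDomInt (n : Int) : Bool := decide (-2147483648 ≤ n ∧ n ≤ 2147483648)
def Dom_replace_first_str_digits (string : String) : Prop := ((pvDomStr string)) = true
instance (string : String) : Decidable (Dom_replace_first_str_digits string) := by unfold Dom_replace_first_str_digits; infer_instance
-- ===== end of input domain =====

-- B replaces A's nine separate containment-test+find scans with min/argmin bookkeeping by a
-- single left-to-right positional scan inserting the digit at the first position
-- where any spelled-out digit word starts (objective: simpler).

-- ===== PORT A =====
def pv_str_digits : PySem.Dict String Int :=
  ⟨[("one", 1), ("two", 2), ("three", 3), ("four", 4), ("five", 5),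
    ("six", 6), ("seven", 7), ("eight", 8), ("nine", 9)]⟩

-- the body of A's `for str_digit in str_digits.keys()` loop
def pvA_step (string : String) (st : Int × String × Bool) (str_digit : String) : Int × String × Bool :=
  if PySem.Str.isIn str_digit string then
    -- current_index := string.find(str_digit)
    if PySem.Str.find string str_digit < st.1 then (PySem.Str.find string str_digit, str_digit, true)
    else (st.1, st.2.1, true)
  else st

def replace_first_str_digits (string : String) : String :=
  let st := pv_str_digits.keys.foldl (pvA_step string) (1000, "", false)
  if st.2.2 then
    -- Python would raise KeyError when st.2.1 = "" (excluded by Pre_); getD's default is never the value returned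
    PySem.Str.slice string none (some st.1) ++
      PySem.Int.toStr ((pv_str_digits.get? st.2.1).getD 0) ++
      PySem.Str.slice string (some st.1) none
  else string

-- ===== PORT B =====
def pvB_words : List (String × Int) :=
  [("one", 1), ("two", 2), ("three", 3), ("four", 4), ("five", 5),
   ("six", 6), ("seven", 7), ("eight", 8), ("nine", 9)]

-- `for i in range(len(string)): for d, w in enumerate(_words, 1): if string.startswith(w, i): return …`
-- string.startswith(w, i) is ported as startswith on (toList.drop i), exact for 0 ≤ i ≤ len(string)
def pvB_loop (c : List Char) (i : Nat) : List Char → Option (Nat × Int)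
  | [] => none
  | _ :: rest =>
    match pvB_words.find? (fun p => PySem.Chars.startswith (c.drop i) p.1.toList) with
    | some p => some (i, p.2)
    | none => pvB_loop c (i + 1) rest

def replace_first_str_digits_alt (string : String) : String :=
  match pvB_loop string.toList 0 string.toList with
  | some (i, d) =>
      PySem.Str.slice string none (some (i : Int)) ++ PySem.Int.toStr d ++
        PySem.Str.slice string (some (i : Int)) none
  | none => string

-- ===== PRECONDITION & SPEC =====
def pvWords : List String := ["one", "two", "three", "four", "five", "six", "seven", "eight", "nine"]

-- Pre_ excludes exactly the strings on which A raises KeyError: some digit word occurs,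
-- but every occurring word's first occurrence is at index ≥ 1000 (A's lowest_index sentinel
-- 1000 is then never beaten although flag is set, so A looks up str_digits[""]).
def Pre_replace_first_str_digits (string : String) : Prop :=
  (∀ w ∈ pvWords, PySem.Str.isIn w string = false) ∨
  (∃ w ∈ pvWords, PySem.Str.isIn w string = true ∧ PySem.Str.find string w < 1000)

instance (string : String) : Decidable (Pre_replace_first_str_digits string) := by
  unfold Pre_replace_first_str_digits; infer_instance

def pvWitness_replace_first_str_digits : String := "xtwone3four"

def Spec_replace_first_str_digits (string : String) (out : String) : Prop :=
  out = replace_first_str_digits_alt string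
instance (string : String) (out : String) : Decidable (Spec_replace_first_str_digits string out) := by
  unfold Spec_replace_first_str_digits; infer_instance

-- ===== CLAIM (what is proved, stated in full; the proofs are below) =====
def Claim_equal_replace_first_str_digits : Prop :=
  ∀ (string : String), Dom_replace_first_str_digits string →
    Pre_replace_first_str_digits string →
    Spec_replace_first_str_digits string (replace_first_str_digits string)

-- ===== LEMMAS AND PROOFS =====

-- no word of pvB_words is a (possibly improper) prefix of another entry's word
lemma pv_prefix_uniq : ∀ p ∈ pvB_words, ∀ q ∈ pvB_words, p.1.toList <+: q.1.toList → p = q := by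
  decide

-- at any one suffix, at most one entry of pvB_words matches
lemma pv_unique_at (t : List Char) {p q : String × Int} (hp : p ∈ pvB_words) (hq : q ∈ pvB_words)
    (hpt : p.1.toList <+: t) (hqt : q.1.toList <+: t) : p = q := by
  rcases List.prefix_or_prefix_of_prefix hpt hqt with h | h
  · exact pv_prefix_uniq p hp q hq h
  · exact (pv_prefix_uniq q hq p hp h).symm

lemma pv_pairs_words : ∀ p ∈ pvB_words, p.1 ∈ pvWords := by decide

lemma pv_words_pair : ∀ w ∈ pvWords, (w, (pv_str_digits.get? w).getD 0) ∈ pvB_words := by decide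

lemma pv_words_ne_nil : ∀ p ∈ pvB_words, p.1.toList ≠ [] := by decide

lemma pv_keys_eq : pv_str_digits.keys = pvWords := by decide

-- `isIn` as a positional match
lemma pv_isIn_iff (string w : String) :
    PySem.Str.isIn w string = true ↔ ∃ j, w.toList <+: string.toList.drop j := by
  rw [PySem.Str.isIn_eq, ← PySem.Chars.exists_prefix_drop_iff_isIn]

lemma pv_find_nonneg {string w : String} (h : PySem.Str.isIn w string = true) :
    0 ≤ PySem.Str.find string w := by
  rw [PySem.Str.find_eq, PySem.Chars.find_nonneg_iff]
  exact (PySem.Str.isIn_iff_infix w string).mp h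

lemma pv_find_prefix {string w : String} (h : PySem.Str.isIn w string = true) :
    w.toList <+: string.toList.drop (PySem.Str.find string w).toNat := by
  have := (PySem.Chars.find_spec (s := string.toList) (sub := w.toList)
    (by rw [← PySem.Str.find_eq]; exact pv_find_nonneg h)).1
  rwa [← PySem.Str.find_eq] at this

lemma pv_find_le {string w : String} {k : Nat} (h : w.toList <+: string.toList.drop k) :
    PySem.Str.find string w ≤ (k : Int) := by
  have hin : PySem.Str.isIn w string = true := (pv_isIn_iff string w).mpr ⟨k, h⟩
  have hnn := pv_find_nonneg hin
  have hspec := (PySem.Chars.find_spec (s := string.toList) (sub := w.toList)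
    (by rwa [← PySem.Str.find_eq])).2
  rw [← PySem.Str.find_eq] at hspec
  by_contra hlt
  exact hspec k (by omega) h

-- ----- A-side fold characterisation -----

lemma pvA_flag (string : String) :
    ∀ (ws : List String) (st : Int × String × Bool),
      (ws.foldl (pvA_step string) st).2.2 = (st.2.2 || ws.any (fun w => PySem.Str.isIn w string)) := by
  intro ws
  induction ws with
  | nil => intro st; simp
  | cons a tl ih =>
    intro st
    rw [List.foldl_cons, List.any_cons, ih]
    unfold pvA_step
    split_ifs with h1 h2
    · rw [h1]; simp
    · rw [h1]; simp
    · rw [Bool.eq_false_iff.mpr h1]; simp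

lemma pvA_keep (string : String) :
    ∀ (ws : List String) (st : Int × String × Bool),
      (∀ w ∈ ws, PySem.Str.isIn w string = true → st.1 ≤ PySem.Str.find string w) →
      (ws.foldl (pvA_step string) st).1 = st.1 ∧ (ws.foldl (pvA_step string) st).2.1 = st.2.1 := by
  intro ws
  induction ws with
  | nil => intro st _; simp
  | cons a tl ih =>
    intro st hle
    rw [List.foldl_cons]
    unfold pvA_step
    split_ifs with h1 h2
    · exact absurd h2 (by have := hle a (by simp) h1; omega)
    · exact ih (st.1, st.2.1, true) (fun w hw h => hle w (by simp [hw]) h)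
    · exact ih st (fun w hw h => hle w (by simp [hw]) h)

lemma pvA_min (string : String) :
    ∀ (ws : List String) (w : String) (st : Int × String × Bool),
      w ∈ ws → PySem.Str.isIn w string = true → PySem.Str.find string w < st.1 →
      (∀ w' ∈ ws, PySem.Str.isIn w' string = true → PySem.Str.find string w ≤ PySem.Str.find string w') →
      (∀ w' ∈ ws, PySem.Str.isIn w' string = true → w' ≠ w →
        PySem.Str.find string w' ≠ PySem.Str.find string w) →
      (ws.foldl (pvA_step string) st).1 = PySem.Str.find string w ∧
      (ws.foldl (pvA_step string) st).2.1 = w := by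
  intro ws
  induction ws with
  | nil => intro w st hw; simp at hw
  | cons a tl ih =>
    intro w st hw hfound hlt hmin huniq
    rw [List.foldl_cons]
    unfold pvA_step
    by_cases haw : a = w
    · subst haw
      rw [if_pos hfound, if_pos hlt]
      exact pvA_keep string tl (PySem.Str.find string a, a, true)
        (fun w' hw' h => hmin w' (by simp [hw']) h)
    · have hwtl : w ∈ tl := by
        rcases List.mem_cons.mp hw with h | h
        · exact absurd h.symm haw
        · exact h
      split_ifs with h1 h2
      · have hne := huniq a (by simp) h1 haw
        have hle := hmin a (by simp) h1
        exact ih w (PySem.Str.find string a, a, true) hwtl hfound (by simp only []; omega)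
          (fun w' hw' h => hmin w' (by simp [hw']) h)
          (fun w' hw' h hne' => huniq w' (by simp [hw']) h hne')
      · exact ih w (st.1, st.2.1, true) hwtl hfound (by simpa using hlt)
          (fun w' hw' h => hmin w' (by simp [hw']) h)
          (fun w' hw' h hne' => huniq w' (by simp [hw']) h hne')
      · exact ih w st hwtl hfound hlt
          (fun w' hw' h => hmin w' (by simp [hw']) h)
          (fun w' hw' h hne' => huniq w' (by simp [hw']) h hne')

-- ----- minimal found word exists -----

lemma pv_exists_min (string : String) :
    ∀ (ws : List String), (∃ w ∈ ws, PySem.Str.isIn w string = true) →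
      ∃ w ∈ ws, PySem.Str.isIn w string = true ∧
        ∀ w' ∈ ws, PySem.Str.isIn w' string = true →
          PySem.Str.find string w ≤ PySem.Str.find string w' := by
  intro ws
  induction ws with
  | nil => rintro ⟨w, hw, -⟩; simp at hw
  | cons a tl ih =>
    rintro ⟨w0, hw0, hf0⟩
    by_cases htl : ∃ w ∈ tl, PySem.Str.isIn w string = true
    · obtain ⟨w, hw, hfw, hmin⟩ := ih htl
      by_cases ha : PySem.Str.isIn a string = true
      · by_cases hle : PySem.Str.find string a ≤ PySem.Str.find string w
        · exact ⟨a, by simp, ha, by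
            intro w' hw' h
            rcases List.mem_cons.mp hw' with rfl | hw'
            · exact le_refl _
            · exact le_trans hle (hmin w' hw' h)⟩
        · exact ⟨w, by simp [hw], hfw, by
            intro w' hw' h
            rcases List.mem_cons.mp hw' with rfl | hw'
            · omega
            · exact hmin w' hw' h⟩
      · exact ⟨w, by simp [hw], hfw, by
          intro w' hw' h
          rcases List.mem_cons.mp hw' with rfl | hw'
          · exact absurd h ha
          · exact hmin w' hw' h⟩
    · have ha : PySem.Str.isIn a string = true ∧ w0 = a := by
        rcases List.mem_cons.mp hw0 with rfl | hw0
        · exact ⟨hf0, rfl⟩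
        · exact absurd ⟨w0, hw0, hf0⟩ htl
      exact ⟨a, by simp, ha.1, by
        intro w' hw' h
        rcases List.mem_cons.mp hw' with rfl | hw'
        · exact le_refl _
        · exact absurd ⟨w', hw', h⟩ htl⟩

-- ----- B-side loop characterisation -----

lemma pv_find?_unique {α : Type} (pred : α → Bool) :
    ∀ (l : List α) (p : α), p ∈ l → pred p = true → (∀ q ∈ l, pred q = true → q = p) →
      l.find? pred = some p := by
  intro l
  induction l with
  | nil => intro p hp; simp at hp
  | cons a tl ih =>
    intro p hp hpred huniq
    by_cases ha : pred a = true
    · rw [List.find?_cons_of_pos ha, huniq a (by simp) ha]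
    · rw [List.find?_cons_of_neg ha]
      have hptl : p ∈ tl := by
        rcases List.mem_cons.mp hp with rfl | h
        · exact absurd hpred ha
        · exact h
      exact ih p hptl hpred (fun q hq h => huniq q (by simp [hq]) h)

lemma pvB_none (c : List Char) (h : ∀ p ∈ pvB_words, ∀ j, ¬ p.1.toList <+: c.drop j) :
    ∀ (rest : List Char) (i : Nat), pvB_loop c i rest = none := by
  intro rest
  induction rest with
  | nil => intro i; rfl
  | cons ch rest ih =>
    intro i
    have hfind : pvB_words.find? (fun p => PySem.Chars.startswith (c.drop i) p.1.toList) = none := by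
      rw [List.find?_eq_none]
      intro p hp hpred
      exact h p hp i ((PySem.Chars.startswith_iff _ _).mp hpred)
    simp [pvB_loop, hfind, ih]

lemma pvB_reach (c : List Char) (m : Nat) (pw : String × Int)
    (hfindm : pvB_words.find? (fun p => PySem.Chars.startswith (c.drop m) p.1.toList) = some pw)
    (hmatch : pw.1.toList <+: c.drop m) :
    ∀ (rest : List Char) (i : Nat), rest = c.drop i → i ≤ m →
      (∀ k, i ≤ k → k < m →
        pvB_words.find? (fun p => PySem.Chars.startswith (c.drop k) p.1.toList) = none) →
      pvB_loop c i rest = some (m, pw.2) := by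
  intro rest
  induction rest with
  | nil =>
    intro i hrest him _
    exfalso
    have hlen : c.length ≤ i := List.drop_eq_nil_iff.mp hrest.symm
    have hdropm : c.drop m = [] := List.drop_eq_nil_iff.mpr (by omega)
    rw [hdropm, List.prefix_nil] at hmatch
    exact pv_words_ne_nil pw (List.mem_of_find?_eq_some hfindm) hmatch
  | cons ch rest ih =>
    intro i hrest him hnone
    by_cases hi : i = m
    · subst hi
      simp [pvB_loop, hfindm]
    · have hlt : i < m := by omega
      have hrest' : rest = c.drop (i + 1) := by
        have : c.drop (i + 1) = (c.drop i).drop 1 := by rw [List.drop_drop]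
        rw [this, ← hrest]; rfl
      simp only [pvB_loop, hnone i (le_refl i) hlt]
      exact ih (i + 1) hrest' (by omega) (fun k hk1 hk2 => hnone k (by omega) hk2)

-- ===== VERDICT (by name: the statement is the Claim_ definition above) =====
theorem replace_first_str_digits_spec : Claim_equal_replace_first_str_digits := by
  intro string _hdom hpre
  unfold Spec_replace_first_str_digits
  by_cases hex : ∃ w ∈ pvWords, PySem.Str.isIn w string = true
  · -- some digit word occurs
    obtain ⟨w, hw, hfw, hmin⟩ := pv_exists_min string pvWords hex
    -- its find index is < 1000 thanks to Pre_
    have hlt1000 : PySem.Str.find string w < 1000 := by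
      rcases hpre with hnone | ⟨w1, hw1, hf1, hlt1⟩
      · obtain ⟨w0, hw0, hf0⟩ := hex
        rw [hnone w0 hw0] at hf0; exact absurd hf0 (by simp)
      · exact lt_of_le_of_lt (hmin w1 hw1 hf1) hlt1
    have hnn : 0 ≤ PySem.Str.find string w := pv_find_nonneg hfw
    set m : Nat := (PySem.Str.find string w).toNat with hm
    have hmInt : (m : Int) = PySem.Str.find string w := Int.toNat_of_nonneg hnn
    have hwpref : w.toList <+: string.toList.drop m := pv_find_prefix hfw
    set pw : String × Int := (w, (pv_str_digits.get? w).getD 0) with hpw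
    have hpwmem : pw ∈ pvB_words := pv_words_pair w hw
    -- any other occurring word's find is strictly larger
    have huniq : ∀ w' ∈ pvWords, PySem.Str.isIn w' string = true → w' ≠ w →
        PySem.Str.find string w' ≠ PySem.Str.find string w := by
      intro w' hw' hf' hne heq
      have hnn' : 0 ≤ PySem.Str.find string w' := pv_find_nonneg hf'
      have hpref' : w'.toList <+: string.toList.drop m := by
        have := pv_find_prefix hf'
        rwa [heq] at this
      have hp'mem : (w', (pv_str_digits.get? w').getD 0) ∈ pvB_words := pv_words_pair w' hw'
      have := pv_unique_at (string.toList.drop m) hp'mem hpwmem hpref' hwpref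
      exact hne (congrArg Prod.fst this)
    -- the inner find? at position m returns exactly pw
    have hfindm : pvB_words.find?
        (fun p => PySem.Chars.startswith (string.toList.drop m) p.1.toList) = some pw := by
      apply pv_find?_unique _ _ pw hpwmem ((PySem.Chars.startswith_iff _ _).mpr hwpref)
      intro q hq hqpred
      exact pv_unique_at (string.toList.drop m) hq hpwmem
        ((PySem.Chars.startswith_iff _ _).mp hqpred) hwpref
    -- no position before m has a match
    have hnone : ∀ k, 0 ≤ k → k < m →
        pvB_words.find? (fun p => PySem.Chars.startswith (string.toList.drop k) p.1.toList) = none := by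
      intro k _ hkm
      rw [List.find?_eq_none]
      intro p hp hpred
      have hppref := (PySem.Chars.startswith_iff _ _).mp hpred
      have hle := pv_find_le (string := string) (w := p.1) hppref
      have hgem := hmin p.1 (pv_pairs_words p hp) ((pv_isIn_iff string p.1).mpr ⟨k, hppref⟩)
      omega
    -- evaluate B
    have hB : pvB_loop string.toList 0 string.toList = some (m, pw.2) :=
      pvB_reach string.toList m pw hfindm hwpref string.toList 0 rfl (by omega)
        (fun k hk1 hk2 => hnone k hk1 hk2)
    -- evaluate A's fold
    have hfold := pvA_min string pvWords w (1000, "", false) hw hfw (by simpa using hlt1000)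
      hmin (fun w' hw' h hne => huniq w' hw' h hne)
    have hflag : ((pvWords.foldl (pvA_step string) (1000, "", false)).2.2) = true := by
      rw [pvA_flag]
      simp only [Bool.false_or, List.any_eq_true]
      exact ⟨w, hw, hfw⟩
    unfold replace_first_str_digits replace_first_str_digits_alt
    rw [pv_keys_eq, hB]
    simp only [hflag, if_true, hfold.1, hfold.2]
    rw [hmInt]
  · -- no digit word occurs: both return the string unchanged
    push Not at hex
    have hall : ∀ w ∈ pvWords, PySem.Str.isIn w string = false := by
      intro w hw
      exact Bool.eq_false_iff.mpr (fun h => absurd h (by simpa using hex w hw))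
    have hflag : ((pvWords.foldl (pvA_step string) (1000, "", false)).2.2) = false := by
      rw [pvA_flag]
      simp only [Bool.false_or, List.any_eq_false]
      intro w hw
      rw [hall w hw]
      simp
    have hB : pvB_loop string.toList 0 string.toList = none := by
      apply pvB_none
      intro p hp j hpref
      have := (pv_isIn_iff string p.1).mpr ⟨j, hpref⟩
      rw [hall p.1 (pv_pairs_words p hp)] at this
      exact absurd this (by simp)
    unfold replace_first_str_digits replace_first_str_digits_alt
    rw [pv_keys_eq, hB]
    simp [hflag]
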